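-- pv_equiv track=rewrite | github.com/XSirch/true-wind | TrueWind.py | beaufort_scale
-- ===== SOURCE A (Python) =====
-- def beaufort_scale(speed_kn):
--     limits = [1, 4, 7, 11, 17, 22, 28, 34, 41, 48, 56, 64]
--     names = [
--         "Calmo", "Vento leve", "Brisa fraca", "Brisa leve",
--         "Brisa moderada", "Brisa fresca", "Vento fresco", "Vento forte",
--         "Tempestuoso", "Tempestade", "Tempestade forte", "Furacão"
--     ]
--     for i, lim in enumerate(limits):
--         if speed_kn < lim:
--             return i, names[i]
--     return 12, names[-1]
-- ===== SOURCE B (Python) =====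
-- def beaufort_scale(speed_kn):
--     limits = [1, 4, 7, 11, 17, 22, 28, 34, 41, 48, 56, 64]
--     names = [
--         "Calmo", "Vento leve", "Brisa fraca", "Brisa leve",
--         "Brisa moderada", "Brisa fresca", "Vento fresco", "Vento forte",
--         "Tempestuoso", "Tempestade", "Tempestade forte", "Furacão"
--     ]
--     lo, hi = 0, len(limits)
--     while lo < hi:
--         mid = (lo + hi) // 2
--         if speed_kn < limits[mid]:
--             hi = mid
--         else:
--             lo = mid + 1
--     return lo, names[lo] if lo < len(names) else names[-1]
-- ===== Notes on version B (the rewrite author's own statement) =====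
-- stated objective: alternative
-- what changed: Replaces the linear enumerate-scan over the thresholds with a hand-written binary search (bisect_right) over the sorted limits list, then indexes names once.
import Mathlib
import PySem

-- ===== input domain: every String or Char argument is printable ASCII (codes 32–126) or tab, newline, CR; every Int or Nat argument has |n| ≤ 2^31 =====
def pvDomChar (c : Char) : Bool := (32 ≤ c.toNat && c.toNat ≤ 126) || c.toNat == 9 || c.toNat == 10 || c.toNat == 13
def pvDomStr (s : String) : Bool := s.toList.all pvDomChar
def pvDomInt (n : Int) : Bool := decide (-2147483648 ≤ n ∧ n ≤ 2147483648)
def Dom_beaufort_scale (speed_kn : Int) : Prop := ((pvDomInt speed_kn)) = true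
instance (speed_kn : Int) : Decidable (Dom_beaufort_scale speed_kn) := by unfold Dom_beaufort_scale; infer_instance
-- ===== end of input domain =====

-- B replaces A's linear threshold scan with a binary search over the same sorted limits (alternative decomposition; return value identical).

def pvLimits : List Int := [1, 4, 7, 11, 17, 22, 28, 34, 41, 48, 56, 64]
def pvNames : List String :=
  ["Calmo", "Vento leve", "Brisa fraca", "Brisa leve",
   "Brisa moderada", "Brisa fresca", "Vento fresco", "Vento forte",
   "Tempestuoso", "Tempestade", "Tempestade forte", "Furacão"]

-- ===== PORT A =====
-- the 'for i, lim in enumerate(limits)' loop: first i with speed_kn < lim, else the trailer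
def pvScanA (speed_kn : Int) : List (Int × Int) → Int × String
  | [] => (12, (PySem.List.pyGet? pvNames (-1)).getD "")
  | (i, lim) :: rest =>
    if speed_kn < lim then (i, (PySem.List.pyGet? pvNames i).getD "")
    else pvScanA speed_kn rest

def beaufort_scale (speed_kn : Int) : Int × String :=
  pvScanA speed_kn (PySem.List.enumerate pvLimits)

-- ===== PORT B =====
-- the 'while lo < hi' binary search of Source B
def pvBsr (speed_kn : Int) (lo hi : Nat) : Nat :=
  if _h : lo < hi then
    let mid := (lo + hi) / 2
    if speed_kn < (PySem.List.pyGet? pvLimits (mid : Int)).getD 0 then pvBsr speed_kn lo mid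
    else pvBsr speed_kn (mid + 1) hi
  else lo
termination_by hi - lo
decreasing_by all_goals omega

def beaufort_scale_alt (speed_kn : Int) : Int × String :=
  let lo := pvBsr speed_kn 0 pvLimits.length
  ((lo : Int),
    if lo < pvNames.length then (PySem.List.pyGet? pvNames (lo : Int)).getD ""
    else (PySem.List.pyGet? pvNames (-1)).getD "")

-- ===== PRECONDITION & SPEC =====
def Spec_beaufort_scale (speed_kn : Int) (out : Int × String) : Prop := out = beaufort_scale_alt speed_kn
instance (speed_kn : Int) (out : Int × String) : Decidable (Spec_beaufort_scale speed_kn out) := by unfold Spec_beaufort_scale; infer_instance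

-- ===== CLAIM (what is proved, stated in full; the proofs are below) =====
def Claim_equal_beaufort_scale : Prop := ∀ (speed_kn : Int), Dom_beaufort_scale speed_kn → Spec_beaufort_scale speed_kn (beaufort_scale speed_kn)

-- ===== LEMMAS AND PROOFS =====

theorem beaufort_both (speed_kn : Int) :
    beaufort_scale speed_kn = beaufort_scale_alt speed_kn := by
  by_cases h0 : speed_kn < 1
  · simp [beaufort_scale, beaufort_scale_alt, pvScanA, pvBsr, pvLimits, pvNames, PySem.List.enumerate, PySem.List.pyGet?, PySem.List.pyIdx?, (show speed_kn < 1 by omega), (show speed_kn < 4 by omega), (show speed_kn < 7 by omega), (show speed_kn < 11 by omega), (show speed_kn < 17 by omega), (show speed_kn < 22 by omega), (show speed_kn < 28 by omega), (show speed_kn < 34 by omega), (show speed_kn < 41 by omega), (show speed_kn < 48 by omega), (show speed_kn < 56 by omega), (show speed_kn < 64 by omega)]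
  by_cases h1 : speed_kn < 4
  · simp [beaufort_scale, beaufort_scale_alt, pvScanA, pvBsr, pvLimits, pvNames, PySem.List.enumerate, PySem.List.pyGet?, PySem.List.pyIdx?, (show ¬ speed_kn < 1 by omega), (show speed_kn < 4 by omega), (show speed_kn < 7 by omega), (show speed_kn < 11 by omega), (show speed_kn < 17 by omega), (show speed_kn < 22 by omega), (show speed_kn < 28 by omega), (show speed_kn < 34 by omega), (show speed_kn < 41 by omega), (show speed_kn < 48 by omega), (show speed_kn < 56 by omega), (show speed_kn < 64 by omega)]
  by_cases h2 : speed_kn < 7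
  · simp [beaufort_scale, beaufort_scale_alt, pvScanA, pvBsr, pvLimits, pvNames, PySem.List.enumerate, PySem.List.pyGet?, PySem.List.pyIdx?, (show ¬ speed_kn < 1 by omega), (show ¬ speed_kn < 4 by omega), (show speed_kn < 7 by omega), (show speed_kn < 11 by omega), (show speed_kn < 17 by omega), (show speed_kn < 22 by omega), (show speed_kn < 28 by omega), (show speed_kn < 34 by omega), (show speed_kn < 41 by omega), (show speed_kn < 48 by omega), (show speed_kn < 56 by omega), (show speed_kn < 64 by omega)]
  by_cases h3 : speed_kn < 11
  · simp [beaufort_scale, beaufort_scale_alt, pvScanA, pvBsr, pvLimits, pvNames, PySem.List.enumerate, PySem.List.pyGet?, PySem.List.pyIdx?, (show ¬ speed_kn < 1 by omega), (show ¬ speed_kn < 4 by omega), (show ¬ speed_kn < 7 by omega), (show speed_kn < 11 by omega), (show speed_kn < 17 by omega), (show speed_kn < 22 by omega), (show speed_kn < 28 by omega), (show speed_kn < 34 by omega), (show speed_kn < 41 by omega), (show speed_kn < 48 by omega), (show speed_kn < 56 by omega), (show speed_kn < 64 by omega)]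
  by_cases h4 : speed_kn < 17
  · simp [beaufort_scale, beaufort_scale_alt, pvScanA, pvBsr, pvLimits, pvNames, PySem.List.enumerate, PySem.List.pyGet?, PySem.List.pyIdx?, (show ¬ speed_kn < 1 by omega), (show ¬ speed_kn < 4 by omega), (show ¬ speed_kn < 7 by omega), (show ¬ speed_kn < 11 by omega), (show speed_kn < 17 by omega), (show speed_kn < 22 by omega), (show speed_kn < 28 by omega), (show speed_kn < 34 by omega), (show speed_kn < 41 by omega), (show speed_kn < 48 by omega), (show speed_kn < 56 by omega), (show speed_kn < 64 by omega)]
  by_cases h5 : speed_kn < 22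
  · simp [beaufort_scale, beaufort_scale_alt, pvScanA, pvBsr, pvLimits, pvNames, PySem.List.enumerate, PySem.List.pyGet?, PySem.List.pyIdx?, (show ¬ speed_kn < 1 by omega), (show ¬ speed_kn < 4 by omega), (show ¬ speed_kn < 7 by omega), (show ¬ speed_kn < 11 by omega), (show ¬ speed_kn < 17 by omega), (show speed_kn < 22 by omega), (show speed_kn < 28 by omega), (show speed_kn < 34 by omega), (show speed_kn < 41 by omega), (show speed_kn < 48 by omega), (show speed_kn < 56 by omega), (show speed_kn < 64 by omega)]
  by_cases h6 : speed_kn < 28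
  · simp [beaufort_scale, beaufort_scale_alt, pvScanA, pvBsr, pvLimits, pvNames, PySem.List.enumerate, PySem.List.pyGet?, PySem.List.pyIdx?, (show ¬ speed_kn < 1 by omega), (show ¬ speed_kn < 4 by omega), (show ¬ speed_kn < 7 by omega), (show ¬ speed_kn < 11 by omega), (show ¬ speed_kn < 17 by omega), (show ¬ speed_kn < 22 by omega), (show speed_kn < 28 by omega), (show speed_kn < 34 by omega), (show speed_kn < 41 by omega), (show speed_kn < 48 by omega), (show speed_kn < 56 by omega), (show speed_kn < 64 by omega)]
  by_cases h7 : speed_kn < 34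
  · simp [beaufort_scale, beaufort_scale_alt, pvScanA, pvBsr, pvLimits, pvNames, PySem.List.enumerate, PySem.List.pyGet?, PySem.List.pyIdx?, (show ¬ speed_kn < 1 by omega), (show ¬ speed_kn < 4 by omega), (show ¬ speed_kn < 7 by omega), (show ¬ speed_kn < 11 by omega), (show ¬ speed_kn < 17 by omega), (show ¬ speed_kn < 22 by omega), (show ¬ speed_kn < 28 by omega), (show speed_kn < 34 by omega), (show speed_kn < 41 by omega), (show speed_kn < 48 by omega), (show speed_kn < 56 by omega), (show speed_kn < 64 by omega)]
  by_cases h8 : speed_kn < 41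
  · simp [beaufort_scale, beaufort_scale_alt, pvScanA, pvBsr, pvLimits, pvNames, PySem.List.enumerate, PySem.List.pyGet?, PySem.List.pyIdx?, (show ¬ speed_kn < 1 by omega), (show ¬ speed_kn < 4 by omega), (show ¬ speed_kn < 7 by omega), (show ¬ speed_kn < 11 by omega), (show ¬ speed_kn < 17 by omega), (show ¬ speed_kn < 22 by omega), (show ¬ speed_kn < 28 by omega), (show ¬ speed_kn < 34 by omega), (show speed_kn < 41 by omega), (show speed_kn < 48 by omega), (show speed_kn < 56 by omega), (show speed_kn < 64 by omega)]
  by_cases h9 : speed_kn < 48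
  · simp [beaufort_scale, beaufort_scale_alt, pvScanA, pvBsr, pvLimits, pvNames, PySem.List.enumerate, PySem.List.pyGet?, PySem.List.pyIdx?, (show ¬ speed_kn < 1 by omega), (show ¬ speed_kn < 4 by omega), (show ¬ speed_kn < 7 by omega), (show ¬ speed_kn < 11 by omega), (show ¬ speed_kn < 17 by omega), (show ¬ speed_kn < 22 by omega), (show ¬ speed_kn < 28 by omega), (show ¬ speed_kn < 34 by omega), (show ¬ speed_kn < 41 by omega), (show speed_kn < 48 by omega), (show speed_kn < 56 by omega), (show speed_kn < 64 by omega)]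
  by_cases h10 : speed_kn < 56
  · simp [beaufort_scale, beaufort_scale_alt, pvScanA, pvBsr, pvLimits, pvNames, PySem.List.enumerate, PySem.List.pyGet?, PySem.List.pyIdx?, (show ¬ speed_kn < 1 by omega), (show ¬ speed_kn < 4 by omega), (show ¬ speed_kn < 7 by omega), (show ¬ speed_kn < 11 by omega), (show ¬ speed_kn < 17 by omega), (show ¬ speed_kn < 22 by omega), (show ¬ speed_kn < 28 by omega), (show ¬ speed_kn < 34 by omega), (show ¬ speed_kn < 41 by omega), (show ¬ speed_kn < 48 by omega), (show speed_kn < 56 by omega), (show speed_kn < 64 by omega)]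
  by_cases h11 : speed_kn < 64
  · simp [beaufort_scale, beaufort_scale_alt, pvScanA, pvBsr, pvLimits, pvNames, PySem.List.enumerate, PySem.List.pyGet?, PySem.List.pyIdx?, (show ¬ speed_kn < 1 by omega), (show ¬ speed_kn < 4 by omega), (show ¬ speed_kn < 7 by omega), (show ¬ speed_kn < 11 by omega), (show ¬ speed_kn < 17 by omega), (show ¬ speed_kn < 22 by omega), (show ¬ speed_kn < 28 by omega), (show ¬ speed_kn < 34 by omega), (show ¬ speed_kn < 41 by omega), (show ¬ speed_kn < 48 by omega), (show ¬ speed_kn < 56 by omega), (show speed_kn < 64 by omega)]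
  · simp [beaufort_scale, beaufort_scale_alt, pvScanA, pvBsr, pvLimits, pvNames, PySem.List.enumerate, PySem.List.pyGet?, PySem.List.pyIdx?, (show ¬ speed_kn < 1 by omega), (show ¬ speed_kn < 4 by omega), (show ¬ speed_kn < 7 by omega), (show ¬ speed_kn < 11 by omega), (show ¬ speed_kn < 17 by omega), (show ¬ speed_kn < 22 by omega), (show ¬ speed_kn < 28 by omega), (show ¬ speed_kn < 34 by omega), (show ¬ speed_kn < 41 by omega), (show ¬ speed_kn < 48 by omega), (show ¬ speed_kn < 56 by omega), (show ¬ speed_kn < 64 by omega)]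

-- ===== VERDICT (by name: the statement is the Claim_ definition above) =====
theorem beaufort_scale_spec : Claim_equal_beaufort_scale := by
  intro s _
  exact (beaufort_both s).symm ▸ rfl
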